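-- pv_equiv track=rewrite | github.com/yeneua/algorithm | SWEA/D2/1979.py | check_crossword
-- ===== SOURCE A (Python) =====
-- def check_crossword(N, K, puzzle):
--     result = 0
--     for i in range(N):
--         count = 0
--         for j in range(N):
--             if puzzle[i][j]==1:
--                 count += 1
--             else:
--                 if count == K:
--                     result += 1
--                     count = 0
--                 else:
--                     count = 0
--             if j == N-1 and count == K:
--                 result += 1
--
--     for j in range(N):
--         count = 0
--         for i in range(N):
--             if puzzle[i][j]:
--                 count += 1
--             else:
--                 if count == K:
--                     result += 1
--                     count = 0
--                 else:
--                     count = 0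
--             if i == N-1 and count == K:
--                 result += 1
--
--     return result
-- ===== SOURCE B (Python) =====
-- def check_crossword(N, K, puzzle):
--     if K < 0:
--         return 0
--     def count_starts(bits):
--         n = len(bits)
--         total = 0
--         for j in range(n - K + 1):
--             if (j == 0 or not bits[j - 1]) and all(bits[j:j + K]) and (j + K == n or not bits[j + K]):
--                 total += 1
--         return total
--     result = 0
--     for i in range(N):
--         result += count_starts([puzzle[i][j] == 1 for j in range(N)])
--     for j in range(N):
--         result += count_starts([bool(puzzle[i][j]) for i in range(N)])
--     return result
-- ===== Notes on version B (the rewrite author's own statement) =====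
-- stated objective: alternative
-- what changed: B replaces A's streaming counter-with-reset scan by a candidate-start search: for each row (key x==1) and column (key truthiness) it tests every start position j independently, checking a window of K true cells with a false-or-edge boundary on each side, and sums the hits; negative K is rejected up front since no run has negative length.
import Mathlib
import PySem

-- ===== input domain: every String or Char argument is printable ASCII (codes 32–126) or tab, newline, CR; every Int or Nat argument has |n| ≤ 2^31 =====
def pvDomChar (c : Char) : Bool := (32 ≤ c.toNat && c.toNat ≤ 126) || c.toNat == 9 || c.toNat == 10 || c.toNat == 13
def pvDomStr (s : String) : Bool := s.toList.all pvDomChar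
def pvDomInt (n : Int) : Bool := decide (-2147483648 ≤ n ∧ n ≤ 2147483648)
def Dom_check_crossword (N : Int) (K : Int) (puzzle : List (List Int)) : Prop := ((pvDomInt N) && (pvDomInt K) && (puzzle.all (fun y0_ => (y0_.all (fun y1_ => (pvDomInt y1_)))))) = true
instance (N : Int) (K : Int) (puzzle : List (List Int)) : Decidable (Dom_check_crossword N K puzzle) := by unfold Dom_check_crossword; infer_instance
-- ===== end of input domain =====

-- B replaces A's streaming counter/reset scan by a candidate-start search: every start
-- position is tested independently for a window of K key-true cells with a false-or-edge
-- boundary on each side; objective: alternative (same result, different algorithm).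

-- ===== PORT A =====
def check_crossword (N : Int) (K : Int) (puzzle : List (List Int)) : Int :=
  let result : Int := 0
  let result := (PySem.List.pyRange 0 N 1).foldl (fun result i =>
    ((PySem.List.pyRange 0 N 1).foldl (fun (rc : Int × Int) j =>
        let rc :=
          if PySem.List.pyGetD (PySem.List.pyGetD puzzle i []) j 0 = 1 then
            (rc.1, rc.2 + 1)
          else if rc.2 = K then (rc.1 + 1, (0 : Int)) else (rc.1, (0 : Int))
        if j = N - 1 ∧ rc.2 = K then (rc.1 + 1, rc.2) else rc)
      (result, (0 : Int))).1) result
  let result := (PySem.List.pyRange 0 N 1).foldl (fun result j =>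
    ((PySem.List.pyRange 0 N 1).foldl (fun (rc : Int × Int) i =>
        let rc :=
          if PySem.List.pyGetD (PySem.List.pyGetD puzzle i []) j 0 ≠ 0 then
            (rc.1, rc.2 + 1)
          else if rc.2 = K then (rc.1 + 1, (0 : Int)) else (rc.1, (0 : Int))
        if i = N - 1 ∧ rc.2 = K then (rc.1 + 1, rc.2) else rc)
      (result, (0 : Int))).1) result
  result

-- ===== PORT B =====
-- Python B's window test at start j: left boundary, K key-true cells, right boundary
def pvCond (K : Int) (bits : List Bool) (j : Int) : Bool :=
  (decide (j = 0) || !(PySem.List.pyGetD bits (j - 1) false)) &&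
  ((PySem.List.slice bits (some j) (some (j + K))).all id) &&
  (decide (j + K = (bits.length : Int)) || !(PySem.List.pyGetD bits (j + K) false))

-- Python B's count_starts helper
def pvCountStarts (K : Int) (bits : List Bool) : Int :=
  (PySem.List.pyRange 0 ((bits.length : Int) - K + 1) 1).foldl
    (fun total j => if pvCond K bits j then total + 1 else total) 0

def check_crossword_alt (N : Int) (K : Int) (puzzle : List (List Int)) : Int :=
  if K < 0 then 0
  else
    let result : Int := 0
    let result := (PySem.List.pyRange 0 N 1).foldl (fun result i =>
      result + pvCountStarts K ((PySem.List.pyRange 0 N 1).map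
        (fun j => decide (PySem.List.pyGetD (PySem.List.pyGetD puzzle i []) j 0 = 1)))) result
    let result := (PySem.List.pyRange 0 N 1).foldl (fun result j =>
      result + pvCountStarts K ((PySem.List.pyRange 0 N 1).map
        (fun i => decide (PySem.List.pyGetD (PySem.List.pyGetD puzzle i []) j 0 ≠ 0)))) result
    result

-- ===== PRECONDITION & SPEC =====
-- Pre_ excludes exactly the inputs where Python A raises IndexError: the first N rows must
-- exist and each have at least N cells.
def Pre_check_crossword (N : Int) (K : Int) (puzzle : List (List Int)) : Prop :=
  N ≤ (puzzle.length : Int) ∧ ∀ r ∈ puzzle.take N.toNat, N ≤ (r.length : Int)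
instance (N : Int) (K : Int) (puzzle : List (List Int)) : Decidable (Pre_check_crossword N K puzzle) := by
  unfold Pre_check_crossword; infer_instance

def pvWitness_check_crossword : Int × Int × List (List Int) := (2, 1, [[1, 0], [0, 1]])

def Spec_check_crossword (N : Int) (K : Int) (puzzle : List (List Int)) (out : Int) : Prop :=
  out = check_crossword_alt N K puzzle
instance (N : Int) (K : Int) (puzzle : List (List Int)) (out : Int) : Decidable (Spec_check_crossword N K puzzle out) := by
  unfold Spec_check_crossword; infer_instance

-- ===== CLAIM =====
def Claim_equal_check_crossword : Prop := ∀ (N : Int) (K : Int) (puzzle : List (List Int)), Dom_check_crossword N K puzzle → Pre_check_crossword N K puzzle → Spec_check_crossword N K puzzle (check_crossword N K puzzle)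

-- ===== LEMMAS AND PROOFS =====

-- A's per-cell update on the (result, run-length) pair, with a Prop key / a Bool cell
def pvStepAP (K : Int) (p : Int → Prop) [DecidablePred p] (s : Int × Int) (x : Int) : Int × Int :=
  if p x then (s.1, s.2 + 1) else if s.2 = K then (s.1 + 1, 0) else (s.1, 0)
def pvStepA (K : Int) (s : Int × Int) (b : Bool) : Int × Int :=
  if b then (s.1, s.2 + 1) else if s.2 = K then (s.1 + 1, 0) else (s.1, 0)
-- A's end-of-line check
def pvEnd (K : Int) (s : Int × Int) : Int × Int := if s.2 = K then (s.1 + 1, s.2) else s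

-- A's inner loop is fold-then-end-check over the line values
lemma pv_inner (K N : Int) (p : Int → Prop) [DecidablePred p] (v : Int → Int) (r : Int)
    (hN : 1 ≤ N) :
    (PySem.List.pyRange 0 N 1).foldl (fun (rc : Int × Int) j =>
        let rc := if p (v j) then (rc.1, rc.2 + 1)
          else if rc.2 = K then (rc.1 + 1, (0 : Int)) else (rc.1, (0 : Int))
        if j = N - 1 ∧ rc.2 = K then (rc.1 + 1, rc.2) else rc) (r, 0)
      = pvEnd K (((PySem.List.pyRange 0 N 1).map v).foldl (pvStepAP K p) (r, 0)) := by
  have h2 : PySem.List.pyRange (N - 1) N 1 = [N - 1] := by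
    have h := PySem.List.pyRange_one_singleton (N - 1)
    rw [show N - 1 + 1 = N from by omega] at h
    exact h
  rw [PySem.List.pyRange_one_append 0 (N - 1) N (by omega) (by omega), h2]
  simp only [List.foldl_append, List.map_append, List.map_cons, List.map_nil,
    List.foldl_cons, List.foldl_nil]
  have hpre : (PySem.List.pyRange 0 (N - 1) 1).foldl (fun (rc : Int × Int) j =>
        let rc := if p (v j) then (rc.1, rc.2 + 1)
          else if rc.2 = K then (rc.1 + 1, (0 : Int)) else (rc.1, (0 : Int))
        if j = N - 1 ∧ rc.2 = K then (rc.1 + 1, rc.2) else rc) (r, 0)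
      = ((PySem.List.pyRange 0 (N - 1) 1).map v).foldl (pvStepAP K p) (r, 0) := by
    refine (PySem.List.foldl_congr_mem _ _ (fun (s : Int × Int) j => pvStepAP K p s (v j)) _ ?_).trans
      (by rw [List.foldl_map])
    intro acc j hj
    have hj' := (PySem.List.mem_pyRange_one.mp hj).2
    simp only [pvStepAP]
    rw [if_neg]
    rintro ⟨h, -⟩
    omega
  rw [hpre]
  simp [pvEnd, pvStepAP]

lemma pv_fold_decide (K : Int) (p : Int → Prop) [DecidablePred p] (xs : List Int) (s : Int × Int) :
    xs.foldl (pvStepAP K p) s = (xs.map (fun x => decide (p x))).foldl (pvStepA K) s := by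
  rw [List.foldl_map]
  refine PySem.List.foldl_congr_mem _ _ _ _ ?_
  intro acc x _
  by_cases h : p x <;> simp [pvStepAP, pvStepA, h]

-- pvCountStarts as a countP over List.range
lemma pv_cnt_eq (K : Int) (L : List Bool) :
    pvCountStarts K L
      = (((List.range (((L.length : Int) - K + 1).toNat)).countP
          (fun (k : Nat) => pvCond K L (k : Int)) : Nat) : Int) := by
  unfold pvCountStarts
  rw [PySem.List.pyRange_one]
  rw [List.foldl_map]
  simp only [sub_zero, zero_add]
  rw [PySem.List.foldl_if_add_one]
  rw [zero_add]

lemma pv_countP_zero (R : Nat) (hR : 1 ≤ R) (P : Prop) [Decidable P] :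
    (List.range R).countP (fun k => decide (k = 0 ∧ P)) = if P then 1 else 0 := by
  obtain ⟨R', rfl⟩ : ∃ R', R = R' + 1 := ⟨R - 1, by omega⟩
  rw [List.range_succ_eq_map, List.countP_cons, List.countP_map]
  have hz : (List.range R').countP ((fun k => decide (k = 0 ∧ P)) ∘ Nat.succ) = 0 := by
    refine List.countP_eq_zero.mpr ?_
    intro k _
    simp
  rw [hz]
  by_cases hP : P <;> simp [hP]

-- evaluations of the window test on an all-true line
lemma pv_cond_repl_zero (a : Nat) :
    pvCond ((a : Nat) : Int) (List.replicate a true) (0 : Int) = true := by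
  simp [pvCond, PySem.List.slice_to_natCast]

lemma pv_cond_repl_small (K : Int) (a : Nat) (hK : 0 ≤ K) (hKa' : K < (a : Int)) :
    pvCond K (List.replicate a true) (0 : Int) = false := by
  have h3 : PySem.List.pyGetD (List.replicate a true) K false = true := by
    rw [show K = ((K.toNat : Nat) : Int) from by omega, PySem.List.pyGetD_natCast]
    have hlt : K.toNat < a := by omega
    simp [List.getD_eq_getElem?_getD, hlt]
  simp [pvCond]
  intro _
  exact ⟨by omega, h3⟩

lemma pv_cond_repl_pos (K : Int) (a : Nat) (hK : 0 ≤ K) (k : Nat) (hk1 : 1 ≤ k)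
    (hka : k ≤ a) :
    pvCond K (List.replicate a true) ((k : Nat) : Int) = false := by
  have hlt : k - 1 < a := by omega
  have h1 : PySem.List.pyGetD (List.replicate a true) ((k : Int) - 1) false = true := by
    rw [show (k : Int) - 1 = (((k - 1 : Nat)) : Int) from by omega, PySem.List.pyGetD_natCast]
    simp [List.getD_eq_getElem?_getD, hlt]
  simp [pvCond, h1]
  intro h
  exact absurd h (by omega)

-- (i) a line that is one all-true run contributes 1 iff its length is K
lemma pv_cnt_replicate (K : Int) (hK : 0 ≤ K) (a : Nat) :
    pvCountStarts K (List.replicate a true) = if (a : Int) = K then 1 else 0 := by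
  rw [pv_cnt_eq]
  simp only [List.length_replicate]
  by_cases hKa : (a : Int) = K
  · subst hKa
    rw [if_pos rfl, show ((a : Int) - ↑a + 1).toNat = 1 from by omega, List.range_one]
    simp [pv_cond_repl_zero a]
  · rw [if_neg hKa]
    by_cases hbig : (a : Int) < K
    · rw [show ((a : Int) - K + 1).toNat = 0 from by omega]
      simp
    · have hKa' : K < (a : Int) := by
        rcases lt_or_eq_of_le (not_lt.mp hbig) with h | h
        · exact h
        · exact absurd h.symm hKa
      have hzero : (List.range ((a : Int) - K + 1).toNat).countP
          (fun (k : Nat) => pvCond K (List.replicate a true) (k : Int)) = 0 := by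
        refine List.countP_eq_zero.mpr ?_
        intro k hk
        have hkM : (k : Int) ≤ (a : Int) - K := by
          have := List.mem_range.mp hk; omega
        by_cases hk0 : k = 0
        · subst hk0
          simp [pv_cond_repl_small K a hK hKa']
        · simp [pv_cond_repl_pos K a hK k (Nat.one_le_iff_ne_zero.mpr hk0) (by omega)]
      rw [hzero]
      rfl

-- the window test on the leading run of `replicate a true ++ false :: L`
lemma pv_cond_front (K : Int) (hK : 0 ≤ K) (a : Nat) (L : List Bool)
    (hKn : K ≤ ((a + 1 + L.length : Nat) : Int)) (k : Nat) (hk : k ≤ a) :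
    pvCond K (List.replicate a true ++ false :: L) (k : Int)
      = decide (k = 0 ∧ (a : Int) = K) := by
  by_cases hk0 : k = 0
  · subst hk0
    by_cases hKa : (a : Int) = K
    · subst hKa
      have hall : (PySem.List.slice (List.replicate a true ++ false :: L)
          none (some ((a : Nat) : Int))).all id = true := by
        rw [PySem.List.slice_to_natCast, List.take_left' (by simp)]
        simp
      have hright : PySem.List.pyGetD (List.replicate a true ++ false :: L)
          ((a : Nat) : Int) false = false := by
        rw [PySem.List.pyGetD_natCast, List.getD_eq_getElem?_getD,
          List.getElem?_append_right (by simp)]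
        simp
      simp [pvCond, hall, hright]
    · rcases lt_or_gt_of_ne (fun h => hKa h.symm) with hlt | hlt
      · -- K < a: the right boundary falls inside the leading true run
        have hlt' : K.toNat < a := by omega
        have h3 : PySem.List.pyGetD (List.replicate a true ++ false :: L) K false = true := by
          rw [show K = ((K.toNat : Nat) : Int) from by omega, PySem.List.pyGetD_natCast,
            List.getD_eq_getElem?_getD, List.getElem?_append_left (by simpa using hlt')]
          simp [hlt']
        simp [pvCond, hKa]
        intro _
        exact ⟨by omega, h3⟩
      · -- a < K: the window reaches the separator, which is false
        have hmem : false ∈ (List.replicate a true ++ false :: L).take K.toNat := by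
          rw [List.take_append]
          refine List.mem_append.mpr (Or.inr ?_)
        -- the tail part of the take starts with the separator
          rw [show K.toNat - (List.replicate a true).length = (K.toNat - a - 1) + 1 from by
            simp; omega]
          simp
        have hall : (PySem.List.slice (List.replicate a true ++ false :: L)
            none (some K)).all id = false := by
          rw [PySem.List.slice_to _ hK]
          exact List.all_eq_false.mpr ⟨false, hmem, by simp⟩
        simp [pvCond, hKa, hall]
  · -- k ≥ 1: the cell before the start is inside the leading true run
    have hlt : k - 1 < a := by omega
    have h1 : PySem.List.pyGetD (List.replicate a true ++ false :: L) ((k : Int) - 1) false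
        = true := by
      rw [show (k : Int) - 1 = (((k - 1 : Nat)) : Int) from by omega, PySem.List.pyGetD_natCast]
      rw [List.getD_eq_getElem?_getD, List.getElem?_append_left (by simpa using hlt)]
      simp [hlt]
    simp [pvCond, h1, hk0]

-- the window test beyond the separator agrees with the test on the tail
lemma pv_cond_shift (K : Int) (hK : 0 ≤ K) (a : Nat) (L : List Bool) (t : Nat) :
    pvCond K (List.replicate a true ++ false :: L) ((a + 1 + t : Nat) : Int)
      = pvCond K L (t : Int) := by
  have hassoc : List.replicate a true ++ false :: L
      = (List.replicate a true ++ [false]) ++ L := by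
    simp
  have e1 : (decide (((a + 1 + t : Nat) : Int) = 0)
        || !(PySem.List.pyGetD (List.replicate a true ++ false :: L)
              (((a + 1 + t : Nat) : Int) - 1) false))
      = (decide ((t : Int) = 0) || !(PySem.List.pyGetD L ((t : Int) - 1) false)) := by
    have hz : ¬ (((a + 1 + t : Nat) : Int) = 0) := by omega
    cases t with
    | zero =>
      have hget : PySem.List.pyGetD (List.replicate a true ++ false :: L)
          (((a + 1 + 0 : Nat) : Int) - 1) false = false := by
        rw [show ((a + 1 + 0 : Nat) : Int) - 1 = ((a : Nat) : Int) from by push_cast; omega,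
          PySem.List.pyGetD_natCast, List.getD_eq_getElem?_getD,
          List.getElem?_append_right (by simp)]
        simp
      rw [hget]
      simp
    | succ t' =>
      have hz' : ¬ (((t' + 1 : Nat) : Int) = 0) := by omega
      have hget : PySem.List.pyGetD (List.replicate a true ++ false :: L)
          (((a + 1 + (t' + 1) : Nat) : Int) - 1) false = L.getD t' false := by
        rw [show ((a + 1 + (t' + 1) : Nat) : Int) - 1 = ((a + (t' + 1) : Nat) : Int) from by
            push_cast; omega,
          PySem.List.pyGetD_natCast, List.getD_eq_getElem?_getD, List.getD_eq_getElem?_getD,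
          List.getElem?_append_right (by simp)]
        simp
      have hgetR : PySem.List.pyGetD L (((t' + 1 : Nat) : Int) - 1) false
          = L.getD t' false := by
        rw [show ((t' + 1 : Nat) : Int) - 1 = ((t' : Nat) : Int) from by push_cast; omega,
          PySem.List.pyGetD_natCast]
      rw [hget, hgetR, decide_eq_false hz, decide_eq_false hz']
  have e2 : PySem.List.slice (List.replicate a true ++ false :: L)
        (some ((a + 1 + t : Nat) : Int)) (some (((a + 1 + t : Nat) : Int) + K))
      = PySem.List.slice L (some (t : Int)) (some ((t : Int) + K)) := by
    rw [show ((a + 1 + t : Nat) : Int) + K = ((a + 1 + t : Nat) : Int) + ((K.toNat : Nat) : Int)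
        from by omega,
      show (t : Int) + K = (t : Int) + ((K.toNat : Nat) : Int) from by omega,
      PySem.List.slice_natCast_add, PySem.List.slice_natCast_add]
    rw [hassoc, List.drop_append]
    have d1 : (List.replicate a true ++ [false]).drop (a + 1 + t) = [] :=
      List.drop_eq_nil_of_le (by simp)
    have d2 : a + 1 + t - (List.replicate a true ++ [false]).length = t := by simp
    rw [d1, d2, List.nil_append]
  have e3 : (decide (((a + 1 + t : Nat) : Int) + K
          = ((List.replicate a true ++ false :: L).length : Int))
        || !(PySem.List.pyGetD (List.replicate a true ++ false :: L)
              (((a + 1 + t : Nat) : Int) + K) false))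
      = (decide ((t : Int) + K = (L.length : Int))
        || !(PySem.List.pyGetD L ((t : Int) + K) false)) := by
    have hd : (((a + 1 + t : Nat) : Int) + K
          = ((List.replicate a true ++ false :: L).length : Int))
        ↔ ((t : Int) + K = (L.length : Int)) := by
      simp only [List.length_append, List.length_replicate, List.length_cons]
      push_cast
      omega
    have hget : PySem.List.pyGetD (List.replicate a true ++ false :: L)
          (((a + 1 + t : Nat) : Int) + K) false
        = PySem.List.pyGetD L ((t : Int) + K) false := by
      rw [show ((a + 1 + t : Nat) : Int) + K = ((a + 1 + (t + K.toNat) : Nat) : Int)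
          from by push_cast; omega,
        show (t : Int) + K = ((t + K.toNat : Nat) : Int) from by push_cast; omega,
        PySem.List.pyGetD_natCast, PySem.List.pyGetD_natCast]
      rw [List.getD_eq_getElem?_getD, List.getD_eq_getElem?_getD]
      rw [show a + 1 + (t + K.toNat) = a + (t + K.toNat + 1) from by omega]
      rw [List.getElem?_append_right (by simp)]
      simp
    rw [hget, decide_eq_decide.mpr hd]
  simp only [pvCond]
  rw [e1, e2, e3]

-- (ii) peeling the leading maximal run and its separator
lemma pv_cnt_run (K : Int) (hK : 0 ≤ K) (a : Nat) (L : List Bool) :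
    pvCountStarts K (List.replicate a true ++ false :: L)
      = (if (a : Int) = K then 1 else 0) + pvCountStarts K L := by
  rw [pv_cnt_eq, pv_cnt_eq]
  have hlen : ((List.replicate a true ++ false :: L).length : Int)
      = ((a + 1 + L.length : Nat) : Int) := by
    simp only [List.length_append, List.length_replicate, List.length_cons]
    push_cast; omega
  rw [hlen]
  by_cases h0 : ((a + 1 + L.length : Nat) : Int) - K + 1 ≤ 0
  · rw [show (((a + 1 + L.length : Nat) : Int) - K + 1).toNat = 0 from by omega,
      show (((L.length : Nat) : Int) - K + 1).toNat = 0 from by push_cast; omega]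
    rw [if_neg (by push_cast; omega)]
    simp
  · have hKn : K ≤ ((a + 1 + L.length : Nat) : Int) := by omega
    by_cases hsplit : a + 1 ≤ (((a + 1 + L.length : Nat) : Int) - K + 1).toNat
    · have hS : (((a + 1 + L.length : Nat) : Int) - K + 1).toNat
          = (a + 1) + (((L.length : Nat) : Int) - K + 1).toNat := by
        push_cast at hsplit ⊢
        omega
      rw [hS, List.range_add, List.countP_append]
      have hfront : (List.range (a + 1)).countP
            (fun (k : Nat) => pvCond K (List.replicate a true ++ false :: L) (k : Int))
          = if (a : Int) = K then 1 else 0 := by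
        refine (List.countP_congr (q := fun (k : Nat) => decide (k = 0 ∧ (a : Int) = K))
          (fun k hk => by
            rw [pv_cond_front K hK a L hKn k (by
              have := List.mem_range.mp hk; omega)])).trans
          (pv_countP_zero (a + 1) (by omega) ((a : Int) = K))
      have hback : ((List.range ((((L.length : Nat) : Int) - K + 1).toNat)).map
              (fun t => a + 1 + t)).countP
            (fun (k : Nat) => pvCond K (List.replicate a true ++ false :: L) (k : Int))
          = (List.range ((((L.length : Nat) : Int) - K + 1).toNat)).countP
            (fun (t : Nat) => pvCond K L (t : Int)) := by
        rw [List.countP_map]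
        refine List.countP_congr (fun t _ => ?_)
        simp only [Function.comp_apply]
        rw [pv_cond_shift K hK a L t]
      rw [hfront, hback]
      by_cases hP : (a : Int) = K <;> simp [hP]
    · have hML : (((L.length : Nat) : Int) - K + 1).toNat = 0 := by
        push_cast at hsplit ⊢
        omega
      rw [hML]
      have hfront : (List.range ((((a + 1 + L.length : Nat) : Int) - K + 1).toNat)).countP
            (fun (k : Nat) => pvCond K (List.replicate a true ++ false :: L) (k : Int))
          = if (a : Int) = K then 1 else 0 := by
        refine (List.countP_congr (q := fun (k : Nat) => decide (k = 0 ∧ (a : Int) = K))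
          (fun k hk => by
            rw [pv_cond_front K hK a L hKn k (by
              have := List.mem_range.mp hk; omega)])).trans
          (pv_countP_zero _ (by omega) ((a : Int) = K))
      rw [hfront]
      by_cases hP : (a : Int) = K <;> simp [hP]

-- the simulation: A's streaming scan equals B's start counting, with the pending run as context
lemma pv_main (K : Int) (hK : 0 ≤ K) :
    ∀ (L : List Bool) (r c : Int), 0 ≤ c →
      (pvEnd K (L.foldl (pvStepA K) (r, c))).1
        = r + pvCountStarts K (List.replicate c.toNat true ++ L) := by
  intro L
  induction L with
  | nil =>
    intro r c hc
    simp only [List.foldl_nil, List.append_nil, pvEnd]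
    rw [pv_cnt_replicate K hK c.toNat, show ((c.toNat : Nat) : Int) = c from by omega]
    by_cases hcK : c = K
    · rw [if_pos hcK, if_pos hcK]
    · rw [if_neg hcK, if_neg hcK]
      omega
  | cons b L ih =>
    intro r c hc
    cases b with
    | true =>
      have hrepl : List.replicate c.toNat true ++ true :: L
          = List.replicate (c + 1).toNat true ++ L := by
        rw [show (c + 1).toNat = c.toNat + 1 from by omega, List.replicate_succ',
          List.append_assoc]
        rfl
      have h := ih r (c + 1) (by omega)
      rw [← hrepl] at h
      simpa [pvStepA] using h
    | false =>
      rw [pv_cnt_run K hK c.toNat L, show ((c.toNat : Nat) : Int) = c from by omega]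
      by_cases hcK : c = K
      · have := ih (r + 1) 0 le_rfl
        simp only [Int.toNat_zero, List.replicate_zero, List.nil_append] at this
        simp only [List.foldl_cons, pvStepA, Bool.false_eq_true, if_false, if_pos hcK]
        rw [this]
        ring
      · have := ih r 0 le_rfl
        simp only [Int.toNat_zero, List.replicate_zero, List.nil_append] at this
        simp only [List.foldl_cons, pvStepA, Bool.false_eq_true, if_false, if_neg hcK]
        rw [this]
        ring

lemma pv_neg (K : Int) (hK : K < 0) :
    ∀ (L : List Bool) (r c : Int), 0 ≤ c →
      (pvEnd K (L.foldl (pvStepA K) (r, c))).1 = r := by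
  intro L
  induction L with
  | nil => intro r c hc; simp only [List.foldl_nil, pvEnd]; rw [if_neg (by omega)]
  | cons b L ih =>
    intro r c hc
    cases b with
    | true =>
      simpa [pvStepA] using ih r (c + 1) (by omega)
    | false =>
      have hcK : ¬ (c = K) := by omega
      simpa [pvStepA, hcK] using ih r 0 le_rfl

-- per-line: A's fold+end equals B's count_starts (K ≥ 0)
lemma pv_line (K : Int) (hK : 0 ≤ K) (L : List Bool) (r : Int) :
    (pvEnd K (L.foldl (pvStepA K) (r, 0))).1 = r + pvCountStarts K L := by
  simpa using pv_main K hK L r 0 le_rfl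

-- one full pass of A (rows or columns) equals the corresponding pass of B, K ≥ 0
lemma pv_pass (K N : Int) (p : Int → Prop) [DecidablePred p] (v : Int → Int → Int)
    (hN1 : 1 ≤ N) (hK : 0 ≤ K) (init : Int) :
    (PySem.List.pyRange 0 N 1).foldl (fun result i =>
        ((PySem.List.pyRange 0 N 1).foldl (fun (rc : Int × Int) j =>
          let rc := if p (v i j) then (rc.1, rc.2 + 1)
            else if rc.2 = K then (rc.1 + 1, (0 : Int)) else (rc.1, (0 : Int))
          if j = N - 1 ∧ rc.2 = K then (rc.1 + 1, rc.2) else rc) (result, 0)).1) init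
      = (PySem.List.pyRange 0 N 1).foldl (fun result i =>
          result + pvCountStarts K ((PySem.List.pyRange 0 N 1).map
            (fun j => decide (p (v i j))))) init := by
  refine PySem.List.foldl_congr_mem _ _ _ _ ?_
  intro acc i _
  rw [congrArg Prod.fst (pv_inner K N p (v i) acc hN1)]
  rw [pv_fold_decide K p]
  rw [List.map_map]
  rw [pv_line K hK]
  rfl

-- one full pass of A returns its accumulator unchanged when K < 0
lemma pv_pass_neg (K N : Int) (p : Int → Prop) [DecidablePred p] (v : Int → Int → Int)
    (hN1 : 1 ≤ N) (hK : K < 0) (init : Int) :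
    (PySem.List.pyRange 0 N 1).foldl (fun result i =>
        ((PySem.List.pyRange 0 N 1).foldl (fun (rc : Int × Int) j =>
          let rc := if p (v i j) then (rc.1, rc.2 + 1)
            else if rc.2 = K then (rc.1 + 1, (0 : Int)) else (rc.1, (0 : Int))
          if j = N - 1 ∧ rc.2 = K then (rc.1 + 1, rc.2) else rc) (result, 0)).1) init
      = init := by
  refine Eq.trans (PySem.List.foldl_congr_mem _ _ (fun (acc : Int) (_ : Int) => acc) _ ?_)
    (PySem.List.foldl_ignore _ _)
  intro acc i _
  rw [congrArg Prod.fst (pv_inner K N p (v i) acc hN1)]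
  rw [pv_fold_decide K p]
  exact pv_neg K hK _ acc 0 le_rfl

-- ===== VERDICT =====
theorem check_crossword_spec : Claim_equal_check_crossword := by
  intro N K puzzle hDom hPre
  unfold Spec_check_crossword
  by_cases hN : N ≤ 0
  · simp [check_crossword, check_crossword_alt, PySem.List.pyRange_one_eq_nil hN]
  · have hN1 : 1 ≤ N := by omega
    by_cases hKneg : K < 0
    · have hB : check_crossword_alt N K puzzle = 0 := by
        unfold check_crossword_alt
        rw [if_pos hKneg]
      rw [hB]
      have e2 := pv_pass_neg K N (fun x => x ≠ 0)
        (fun j i => PySem.List.pyGetD (PySem.List.pyGetD puzzle i []) j 0) hN1 hKneg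
      have e1 := pv_pass_neg K N (fun x => x = 1)
        (fun i j => PySem.List.pyGetD (PySem.List.pyGetD puzzle i []) j 0) hN1 hKneg
      exact Eq.trans (e2 _) (e1 0)
    · have hK : 0 ≤ K := by omega
      have e1 := pv_pass K N (fun x => x = 1)
        (fun i j => PySem.List.pyGetD (PySem.List.pyGetD puzzle i []) j 0) hN1 hK 0
      have e2 := pv_pass K N (fun x => x ≠ 0)
        (fun j i => PySem.List.pyGetD (PySem.List.pyGetD puzzle i []) j 0) hN1 hK
      have hB : check_crossword_alt N K puzzle
          = (PySem.List.pyRange 0 N 1).foldl (fun result j =>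
              result + pvCountStarts K ((PySem.List.pyRange 0 N 1).map
                (fun i => decide (PySem.List.pyGetD (PySem.List.pyGetD puzzle i []) j 0 ≠ 0))))
              ((PySem.List.pyRange 0 N 1).foldl (fun result i =>
                result + pvCountStarts K ((PySem.List.pyRange 0 N 1).map
                  (fun j => decide (PySem.List.pyGetD (PySem.List.pyGetD puzzle i []) j 0 = 1))))
                0) := by
        unfold check_crossword_alt
        rw [if_neg hKneg]
      rw [hB, ← e1]
      exact e2 _
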